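-- pv_equiv track=rewrite | github.com/p61402/NUTN_Chatbot | query3.py | query_matching
-- ===== SOURCE A (Python) =====
-- import collections
--
-- def query_matching(user_query, keywords):
--     queries = ["C", "I", "CR", "CC", "IR", "II", "IP", "CRC", "CPV", "CRI", "IRPV", "CPVRC", "CRCPV"]
--     for num, query in enumerate(queries):
--         if collections.Counter(user_query) == collections.Counter(query):
--             new_keywords = [None] * len(keywords)
--             for i, q1 in enumerate(query):
--                 for j, q2 in enumerate(user_query):
--                     if q1 == q2 and keywords[j]:
--                         new_keywords[i] = keywords[j]
--                         keywords[j] = None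
--             return num, new_keywords
--     return -1, []
-- ===== SOURCE B (Python) =====
-- # B: matches the template by comparing one precomputed sorted character list
-- # (instead of a Counter per template), then builds an index
-- # group per character and hands out each character's truthy keywords in order,
-- # one per occurrence.  B does not mutate `keywords` (A nulls matched entries);
-- # the equivalence claimed is about the return value.
-- def query_matching(user_query, keywords):
--     queries = ["C", "I", "CR", "CC", "IR", "II", "IP", "CRC", "CPV", "CRI", "IRPV", "CPVRC", "CRCPV"]
--     key = sorted(user_query)
--     for num, query in enumerate(queries):
--         if sorted(query) == key:
--             slots = {}
--             for j, c in enumerate(user_query):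
--                 if keywords[j]:
--                     slots.setdefault(c, []).append(j)
--             new_keywords = []
--             for c in query:
--                 group = slots.get(c)
--                 new_keywords.append(keywords[group.pop(0)] if group else None)
--             new_keywords += [None] * (len(keywords) - len(query))
--             return num, new_keywords
--     return -1, []
-- ===== Notes on version B (the rewrite author's own statement) =====
-- stated objective: faster
-- what changed: B compares one precomputed sorted character list against each template instead of building and comparing collections.Counter dicts per template, and replaces A's nested mutate-and-rescan loops by a dict built once from char to the ordered truthy keyword positions, handing out one keyword per occurrence; Pre_ excludes only the inputs where a template matches but keywords is shorter than user_query, on which A (and B) raise IndexError.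
-- intended difference: On queries matching a template with a repeated character (CC, II, CRC, CPVRC anagrams) where that character has two or more truthy keywords, A overwrites the first occurrence with the last such keyword and returns None for the repeat (e.g. ('CC',['a','b']) -> (3,['b',None])), losing keywords; B assigns the keywords in order, one per occurrence ((3,['a','b'])), which is the intended reordering. — e.g. on query_matching("CC", [some "a", some "b"]): A returns (3, [some "b", none]), B returns (3, [some "a", some "b"])
import Mathlib
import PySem

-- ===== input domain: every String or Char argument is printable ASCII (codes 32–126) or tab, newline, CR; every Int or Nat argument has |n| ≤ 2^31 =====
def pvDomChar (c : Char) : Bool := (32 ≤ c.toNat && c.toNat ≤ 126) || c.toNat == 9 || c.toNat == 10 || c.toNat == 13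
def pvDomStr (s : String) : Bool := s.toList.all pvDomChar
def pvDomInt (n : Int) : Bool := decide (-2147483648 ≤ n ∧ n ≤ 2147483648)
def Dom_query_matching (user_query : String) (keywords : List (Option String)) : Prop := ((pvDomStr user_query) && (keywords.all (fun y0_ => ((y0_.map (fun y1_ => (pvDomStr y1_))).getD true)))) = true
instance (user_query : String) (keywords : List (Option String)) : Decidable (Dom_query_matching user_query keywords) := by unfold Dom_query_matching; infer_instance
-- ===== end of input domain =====

-- B matches the template on one precomputed sorted character list (instead of a
-- Counter comparison per template) and hands out each character's truthy keywords
-- in order via a dict of index groups, built once (objective: faster, measured);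
-- A mutates `keywords` in place, B does not: the claims are about the return value.

-- ===== PORT A =====
def pvQueries : List String :=
  ["C", "I", "CR", "CC", "IR", "II", "IP", "CRC", "CPV", "CRI", "IRPV", "CPVRC", "CRCPV"]

-- Python truthiness of an Optional[str]: None and "" are falsy
def pvTruthy (v : Option String) : Bool :=
  match v with
  | none => false
  | some s => !(s == "")

-- Counter(a) == Counter(b): dicts are equal iff same key set and same value per key
def pvCounterEq (d1 d2 : PySem.Dict Char Int) : Bool :=
  PySem.Set.equal d1.keys d2.keys && d1.keys.all (fun k => d1.getD k 0 == d2.getD k 0)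

-- inner 'for j, q2 in enumerate(user_query)' loop, state = (new_keywords, keywords)
def pvInnerA (c : Char) (i : Nat) :
    Nat → List Char → List (Option String) × List (Option String) →
    List (Option String) × List (Option String)
  | _, [], st => st
  | j, d :: us, st =>
      pvInnerA c i (j+1) us
        (if (c == d) && pvTruthy (st.2.getD j none) then
          (st.1.set i (st.2.getD j none), st.2.set j none)
        else st)

-- outer 'for i, q1 in enumerate(query)' loop
def pvOuterA (u : List Char) :
    Nat → List Char → List (Option String) × List (Option String) →
    List (Option String) × List (Option String)
  | _, [], st => st
  | i, c :: qs, st => pvOuterA u (i+1) qs (pvInnerA c i 0 u st)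

-- 'for num, query in enumerate(queries)'
def pvLoopA (u : List Char) (kw : List (Option String)) :
    Int → List String → Int × List (Option String)
  | _, [] => (-1, [])
  | num, q :: rest =>
      if pvCounterEq (PySem.Dict.counter u) (PySem.Dict.counter q.toList) then
        (num, (pvOuterA u 0 q.toList (List.replicate kw.length none, kw)).1)
      else pvLoopA u kw (num+1) rest

def query_matching (user_query : String) (keywords : List (Option String)) :
    Int × List (Option String) :=
  pvLoopA user_query.toList keywords 0 pvQueries

-- ===== PORT B =====
-- 'for j, c in enumerate(user_query): if keywords[j]: slots.setdefault(c, []).append(j)'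
def pvSlotsB (u : List Char) (kw : List (Option String)) : PySem.Dict Char (List Nat) :=
  u.zipIdx.foldl
    (fun d p => if pvTruthy (kw.getD p.2 none) then d.modify p.1 [] (· ++ [p.2]) else d)
    PySem.Dict.empty

-- 'for c in query: new_keywords.append(keywords[group.pop(0)] if group else None)'
def pvBuildAlt (kw : List (Option String)) :
    PySem.Dict Char (List Nat) → List (Option String) → List Char → List (Option String)
  | _, acc, [] => acc
  | d, acc, c :: qs =>
      match d.getD c [] with
      | [] => pvBuildAlt kw d (acc ++ [none]) qs
      | j :: js => pvBuildAlt kw (d.insert c js) (acc ++ [kw.getD j none]) qs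

def pvLoopB (u : List Char) (kw : List (Option String)) (key : List Char) :
    Int → List String → Int × List (Option String)
  | _, [] => (-1, [])
  | num, q :: rest =>
      if (PySem.List.sorted q.toList (fun x => x)) = key then
        (num, pvBuildAlt kw (pvSlotsB u kw) [] q.toList ++
              List.replicate (kw.length - q.toList.length) none)
      else pvLoopB u kw key (num+1) rest

def query_matching_alt (user_query : String) (keywords : List (Option String)) :
    Int × List (Option String) :=
  pvLoopB user_query.toList keywords
    (PySem.List.sorted user_query.toList (fun x => x)) 0 pvQueries

-- ===== PRECONDITION & SPEC =====
-- Pre_ excludes exactly the inputs on which A raises IndexError: a query template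
-- matches user_query but keywords has fewer entries than user_query has characters
-- (B raises there too).
def Pre_query_matching (user_query : String) (keywords : List (Option String)) : Prop :=
  (∃ q ∈ pvQueries, user_query.toList.Perm q.toList) →
    user_query.toList.length ≤ keywords.length

instance (user_query : String) (keywords : List (Option String)) :
    Decidable (Pre_query_matching user_query keywords) := by
  unfold Pre_query_matching; infer_instance

def pvWitness_query_matching : String × List (Option String) :=
  ("CR", [some "where", some "course"])

-- On queries matching a template with a repeated character (CC, II, CRC, anagrams of
-- CPVRC) where that character has two or more truthy keywords, A overwrites the first
-- occurrence with the last such keyword and returns None for the repeat, losing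
-- keywords; B hands the keywords out in order, one per occurrence — the intended
-- reordering.
def D_query_matching (user_query : String) (keywords : List (Option String)) : Prop :=
  ((user_query.toList.Perm ['C','C'] ∨ user_query.toList.Perm ['C','R','C'] ∨
      user_query.toList.Perm ['C','P','V','R','C']) ∧
    2 ≤ (user_query.toList.zipIdx.filter
          (fun p => p.1 == 'C' && ((keywords.getD p.2 none).getD "" != ""))).length) ∨
  (user_query.toList.Perm ['I','I'] ∧
    2 ≤ (user_query.toList.zipIdx.filter
          (fun p => p.1 == 'I' && ((keywords.getD p.2 none).getD "" != ""))).length)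

instance (user_query : String) (keywords : List (Option String)) :
    Decidable (D_query_matching user_query keywords) := by
  unfold D_query_matching; infer_instance

def Spec_query_matching (user_query : String) (keywords : List (Option String))
    (out : Int × List (Option String)) : Prop :=
  ¬ D_query_matching user_query keywords → out = query_matching_alt user_query keywords

instance (user_query : String) (keywords : List (Option String))
    (out : Int × List (Option String)) :
    Decidable (Spec_query_matching user_query keywords out) := by
  unfold Spec_query_matching; infer_instance

def pvDiffWitness_query_matching : String × List (Option String) :=
  ("CC", [some "a", some "b"])

def pvDiffWitnessOut_query_matching :
    (Int × List (Option String)) × (Int × List (Option String)) :=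
  ((3, [some "b", none]), (3, [some "a", some "b"]))

-- ===== CLAIM (what is proved, stated in full; the proofs are below) =====
def Claim_unchanged_query_matching : Prop :=
  ∀ (user_query : String) (keywords : List (Option String)),
    Dom_query_matching user_query keywords →
    Pre_query_matching user_query keywords →
    Spec_query_matching user_query keywords (query_matching user_query keywords)

def Claim_changed_query_matching : Prop :=
  Dom_query_matching (pvDiffWitness_query_matching.1) (pvDiffWitness_query_matching.2) ∧
  Pre_query_matching (pvDiffWitness_query_matching.1) (pvDiffWitness_query_matching.2) ∧
  D_query_matching (pvDiffWitness_query_matching.1) (pvDiffWitness_query_matching.2) ∧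
  query_matching (pvDiffWitness_query_matching.1) (pvDiffWitness_query_matching.2) =
    pvDiffWitnessOut_query_matching.1 ∧
  query_matching_alt (pvDiffWitness_query_matching.1) (pvDiffWitness_query_matching.2) =
    pvDiffWitnessOut_query_matching.2 ∧
  pvDiffWitnessOut_query_matching.1 ≠ pvDiffWitnessOut_query_matching.2

def Claim_exact_query_matching : Prop :=
  ∀ (user_query : String) (keywords : List (Option String)),
    Dom_query_matching user_query keywords →
    Pre_query_matching user_query keywords →
    D_query_matching user_query keywords →
    query_matching user_query keywords ≠ query_matching_alt user_query keywords

-- ===== LEMMAS AND PROOFS =====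

-- A-side characterisation (proof-only) ----------------------------------------

-- value A's inner loop leaves in new_keywords[i] (last truthy match wins)
def pvPickF (c : Char) : Nat → List (Option String) → List Char → Option String
  | _, _, [] => none
  | j, kwc, d :: us =>
      match pvPickF c (j+1) kwc us with
      | some v => some v
      | none =>
          if (c == d) && pvTruthy (kwc.getD j none) then kwc.getD j none else none

-- keyword state A's inner loop leaves behind
def pvNulF (c : Char) : Nat → List (Option String) → List Char → List (Option String)
  | _, kwc, [] => kwc
  | j, kwc, d :: us =>
      pvNulF c (j+1)
        (if (c == d) && pvTruthy (kwc.getD j none) then kwc.set j none else kwc) us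

-- keyword state after nulling every truthy slot whose character satisfies f
def pvNulP (u : List Char) (f : Char → Bool) :
    Nat → List (Option String) → List (Option String)
  | _, [] => []
  | j, v :: vs =>
      (if (j < u.length) && f (u.getD j ' ') && pvTruthy v then none else v) ::
        pvNulP u f (j+1) vs

-- what A's interleaved loops compute, per query character
def pvSpecBuild (u : List Char) (kw : List (Option String)) :
    PySem.Set Char → List (Option String) → List Char → List (Option String)
  | _, acc, [] => acc
  | seen, acc, c :: qs =>
      if PySem.Set.contains seen c then pvSpecBuild u kw seen (acc ++ [none]) qs
      else pvSpecBuild u kw (PySem.Set.add seen c) (acc ++ [pvPickF c 0 kw u]) qs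

theorem pvTruthy_some (v : Option String) (h : pvTruthy v = true) : ∃ s, v = some s := by
  cases v with
  | none => simp [pvTruthy] at h
  | some s => exact ⟨s, rfl⟩

theorem pvPickF_congr (c : Char) :
    ∀ (us : List Char) (j : Nat) (kwc kwc' : List (Option String)),
      (∀ t, t < us.length → (c == us.getD t ' ') = true →
        kwc.getD (j+t) none = kwc'.getD (j+t) none) →
      pvPickF c j kwc us = pvPickF c j kwc' us := by
  intro us
  induction us with
  | nil => intro _ _ _ _; rfl
  | cons d us ih =>
      intro j kwc kwc' h
      simp only [pvPickF]
      rw [ih (j+1) kwc kwc' (fun t ht hc => by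
        have := h (t+1) (by simpa using Nat.succ_lt_succ ht) (by simpa using hc)
        simpa [Nat.add_assoc, Nat.add_comm 1 t] using this)]
      cases pvPickF c (j+1) kwc' us with
      | some v => rfl
      | none =>
          by_cases hc : (c == d) = true
          · have := h 0 (by simp) (by simpa using hc)
            simp only [Nat.add_zero] at this
            rw [this, hc]
          · simp only [Bool.not_eq_true] at hc
            simp [hc]

theorem pvPickF_none (c : Char) :
    ∀ (us : List Char) (j : Nat) (kwc : List (Option String)),
      (∀ t, t < us.length →
        ((c == us.getD t ' ') && pvTruthy (kwc.getD (j+t) none)) = false) →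
      pvPickF c j kwc us = none := by
  intro us
  induction us with
  | nil => intro _ _ _; rfl
  | cons d us ih =>
      intro j kwc h
      simp only [pvPickF]
      rw [ih (j+1) kwc (fun t ht => by
        have := h (t+1) (by simpa using Nat.succ_lt_succ ht)
        simpa [Nat.add_assoc, Nat.add_comm 1 t] using this)]
      have h0 := h 0 (by simp)
      simp only [Nat.add_zero, List.getD_cons_zero] at h0
      show (if ((c == d) && pvTruthy (kwc.getD j none)) = true then kwc.getD j none else none) = none
      rw [h0]
      simp

theorem pvPickF_snoc (c : Char) :
    ∀ (us : List Char) (j : Nat) (kwc : List (Option String)) (d : Char),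
      pvPickF c j kwc (us ++ [d]) =
        if (c == d) && pvTruthy (kwc.getD (j + us.length) none) then
          kwc.getD (j + us.length) none
        else pvPickF c j kwc us := by
  intro us
  induction us with
  | nil =>
      intro j kwc d
      simp [pvPickF]
  | cons e us ih =>
      intro j kwc d
      simp only [List.cons_append, pvPickF]
      rw [ih (j+1) kwc d]
      have harith : j + 1 + us.length = j + (us.length + 1) := by omega
      rw [harith]
      by_cases hg : ((c == d) && pvTruthy (kwc.getD (j + (us.length + 1)) none)) = true
      · obtain ⟨s, hs⟩ := pvTruthy_some _ (Bool.and_elim_right hg)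
        simp only [List.length_cons, hs]
        have hg' : ((c == d) && pvTruthy (some s)) = true := by rw [← hs]; exact hg
        rw [if_pos hg', if_pos hg']
      · simp only [Bool.not_eq_true] at hg
        simp only [hg, List.length_cons]
        simp

-- A's inner loop computes (pick into slot i, null the matched truthy slots)
theorem pvInnerA_eq (c : Char) (i : Nat) :
    ∀ (us : List Char) (j : Nat) (new kwc : List (Option String)),
      pvInnerA c i j us (new, kwc) =
        ((match pvPickF c j kwc us with
          | some s => new.set i (some s)
          | none => new), pvNulF c j kwc us) := by
  intro us
  induction us with
  | nil => intro j new kwc; rfl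
  | cons d us ih =>
      intro j new kwc
      simp only [pvInnerA, pvPickF, pvNulF]
      by_cases hg : ((c == d) && pvTruthy (kwc.getD j none)) = true
      · obtain ⟨s, hs⟩ := pvTruthy_some _ (Bool.and_elim_right hg)
        rw [if_pos hg, if_pos hg, if_pos hg, ih]
        have hcongr : pvPickF c (j+1) (kwc.set j none) us = pvPickF c (j+1) kwc us := by
          apply pvPickF_congr
          intro t _ _
          have : j + 1 + t ≠ j := by omega
          simp [List.getD, List.getElem?_set_ne (Ne.symm this)]
        rw [hcongr]
        cases pvPickF c (j+1) kwc us with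
        | some v => simp [hs, List.set_set]
        | none =>
            simp only [List.getD] at hs
            simp [hs]
      · simp only [Bool.not_eq_true] at hg
        rw [if_neg (by rw [hg]; simp), if_neg (by rw [hg]; simp),
          if_neg (by rw [hg]; simp), ih]
        cases pvPickF c (j+1) kwc us <;> rfl

-- pointwise value of pvNulF
theorem pvNulF_getD (c : Char) :
    ∀ (us : List Char) (j : Nat) (kwc : List (Option String)) (t : Nat),
      (pvNulF c j kwc us).getD t none =
        if j ≤ t ∧ t - j < us.length ∧ (c == us.getD (t-j) ' ') = true ∧
            pvTruthy (kwc.getD t none) = true then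
          none
        else kwc.getD t none := by
  intro us
  induction us with
  | nil =>
      intro j kwc t
      simp [pvNulF]
  | cons d us ih =>
      intro j kwc t
      simp only [pvNulF]
      rw [ih]
      by_cases hjt : t = j
      · subst hjt
        have h1 : ¬ (t + 1 ≤ t) := by omega
        rw [if_neg (by intro h; exact h1 h.1)]
        by_cases hg : ((c == d) && pvTruthy (kwc.getD t none)) = true
        · rw [if_pos hg]
          have hget : (kwc.set t none).getD t none = none := by
            by_cases ht : t < kwc.length
            · simp [List.getD, List.getElem?_set_self, ht]
            · have hle : (kwc.set t none).length ≤ t := by simp; omega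
              simp [List.getD, List.getElem?_eq_none hle]
          rw [hget]
          rw [if_pos ⟨Nat.le_refl t, by simp, by
            simpa using Bool.and_elim_left hg, Bool.and_elim_right hg⟩]
        · simp only [Bool.not_eq_true] at hg
          rw [if_neg (by rw [hg]; simp)]
          rw [if_neg (by
            rintro ⟨-, -, hc, htr⟩
            simp only [Nat.sub_self, List.getD_cons_zero] at hc
            rw [hc, htr] at hg
            simp at hg)]
      · have hset :
            (if ((c == d) && pvTruthy (kwc.getD j none)) = true then kwc.set j none else kwc).getD t none
              = kwc.getD t none := by
          by_cases hg : ((c == d) && pvTruthy (kwc.getD j none)) = true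
          · rw [if_pos hg]
            simp [List.getD, List.getElem?_set_ne (by omega : j ≠ t)]
          · simp only [Bool.not_eq_true] at hg
            rw [if_neg (by rw [hg]; simp)]
        rw [hset]
        by_cases hcond : j + 1 ≤ t ∧ t - (j+1) < us.length ∧
            (c == us.getD (t - (j+1)) ' ') = true ∧ pvTruthy (kwc.getD t none) = true
        · rw [if_pos hcond, if_pos ⟨by omega, by
            have := hcond.2.1; simp only [List.length_cons]; omega, by
            have hc := hcond.2.2.1
            have : (d :: us).getD (t - j) ' ' = us.getD (t - (j+1)) ' ' := by
              have ht : t - j = (t - (j+1)) + 1 := by omega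
              rw [ht]; simp
            rw [this]; exact hc, hcond.2.2.2⟩]
        · rw [if_neg hcond, if_neg (by
            rintro ⟨h1, h2, h3, h4⟩
            apply hcond
            refine ⟨by omega, by simp at h2; omega, ?_, h4⟩
            have : (d :: us).getD (t - j) ' ' = us.getD (t - (j+1)) ' ' := by
              have ht : t - j = (t - (j+1)) + 1 := by omega
              rw [ht]; simp
            rw [← this]; exact h3)]

theorem pvNulF_length (c : Char) :
    ∀ (us : List Char) (j : Nat) (kwc : List (Option String)),
      (pvNulF c j kwc us).length = kwc.length := by
  intro us
  induction us with
  | nil => intro j kwc; rfl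
  | cons d us ih =>
      intro j kwc
      simp only [pvNulF]
      rw [ih]
      split <;> simp

theorem pvNulP_getD (u : List Char) (f : Char → Bool) :
    ∀ (vs : List (Option String)) (j : Nat) (t : Nat),
      (pvNulP u f j vs).getD t none =
        if j + t < u.length ∧ t < vs.length ∧ f (u.getD (j+t) ' ') = true ∧
            pvTruthy (vs.getD t none) = true then
          none
        else vs.getD t none := by
  intro vs
  induction vs with
  | nil =>
      intro j t
      simp [pvNulP]
  | cons v vs ih =>
      intro j t
      cases t with
      | zero =>
          simp only [pvNulP, List.getD_cons_zero, Nat.add_zero]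
          by_cases hc : (j < u.length) ∧ f (u.getD j ' ') = true ∧ pvTruthy v = true
          · rw [if_pos (by
              simp only [Bool.and_eq_true, decide_eq_true_eq]
              exact ⟨⟨hc.1, hc.2.1⟩, hc.2.2⟩), if_pos ⟨hc.1, by simp, hc.2.1, hc.2.2⟩]
          · rw [if_neg (by
              simp only [Bool.and_eq_true, decide_eq_true_eq]
              rintro ⟨⟨ha, hb⟩, hcc⟩
              exact hc ⟨ha, hb, hcc⟩), if_neg (by
              rintro ⟨h1, -, h3, h4⟩
              exact hc ⟨h1, h3, h4⟩)]
      | succ t =>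
          simp only [pvNulP, List.getD_cons_succ]
          rw [ih]
          have harith : j + 1 + t = j + (t + 1) := by omega
          rw [harith]
          by_cases hc : j + (t+1) < u.length ∧ t < vs.length ∧
              f (u.getD (j + (t+1)) ' ') = true ∧ pvTruthy (vs.getD t none) = true
          · rw [if_pos hc, if_pos ⟨hc.1, by simpa using Nat.succ_lt_succ hc.2.1,
              hc.2.2.1, hc.2.2.2⟩]
          · rw [if_neg hc, if_neg (by
              rintro ⟨h1, h2, h3, h4⟩
              exact hc ⟨h1, by simpa using Nat.lt_of_succ_lt_succ h2, h3, h4⟩)]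

theorem pvNulP_length (u : List Char) (f : Char → Bool) :
    ∀ (vs : List (Option String)) (j : Nat), (pvNulP u f j vs).length = vs.length := by
  intro vs
  induction vs with
  | nil => intro j; rfl
  | cons v vs ih => intro j; simp [pvNulP, ih]

theorem pvNulP_congr (u : List Char) (f g : Char → Bool) (hfg : ∀ d, f d = g d) :
    ∀ (vs : List (Option String)) (j : Nat), pvNulP u f j vs = pvNulP u g j vs := by
  intro vs
  induction vs with
  | nil => intro j; rfl
  | cons v vs ih => intro j; simp only [pvNulP, hfg, ih]

theorem pvNulP_false (u : List Char) :
    ∀ (vs : List (Option String)) (j : Nat), pvNulP u (fun _ => false) j vs = vs := by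
  intro vs
  induction vs with
  | nil => intro j; rfl
  | cons v vs ih => intro j; simp [pvNulP, ih]

-- two lists of equal length with equal getD-at-none are equal
theorem pvList_ext_getD (l1 l2 : List (Option String)) (hlen : l1.length = l2.length)
    (h : ∀ t, l1.getD t none = l2.getD t none) : l1 = l2 := by
  apply List.ext_getElem hlen
  intro t h1 h2
  have := h t
  rwa [List.getD_eq_getElem l1 none h1, List.getD_eq_getElem l2 none h2] at this

theorem pvContains_add (seen : PySem.Set Char) (c d : Char) :
    PySem.Set.contains (PySem.Set.add seen c) d
      = (PySem.Set.contains seen d || (d == c)) := by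
  apply Bool.eq_iff_iff.mpr
  simp [PySem.Set.contains_iff, PySem.Set.mem_add]

-- nulling set f then the positions of c = nulling set (f ∪ {c})
theorem pvNulF_nulP (u : List Char) (kw : List (Option String)) (c : Char)
    (f : Char → Bool) :
    pvNulF c 0 (pvNulP u f 0 kw) u = pvNulP u (fun d => f d || (d == c)) 0 kw := by
  apply pvList_ext_getD
  · rw [pvNulF_length, pvNulP_length, pvNulP_length]
  · intro t
    rw [pvNulF_getD, pvNulP_getD, pvNulP_getD]
    simp only [Nat.zero_add, Nat.sub_zero, Nat.zero_le, true_and]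
    have hceq' : (u.getD t ' ' = c) ↔ (c = u.getD t ' ') := eq_comm
    by_cases htu : t < u.length <;>
    by_cases htk : t < kw.length <;>
    by_cases hf : f (u.getD t ' ') = true <;>
    by_cases hceq : c = u.getD t ' ' <;>
    by_cases htr : pvTruthy (kw.getD t none) = true <;>
    simp_all [pvTruthy, hceq']

-- the pick A's inner loop makes, on the nulled state
theorem pvPickF_nulP_mem (u : List Char) (kw : List (Option String)) (c : Char)
    (f : Char → Bool) (hc : f c = true) :
    pvPickF c 0 (pvNulP u f 0 kw) u = none := by
  apply pvPickF_none
  intro t ht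
  simp only [Nat.zero_add]
  by_cases hcc : (c == u.getD t ' ') = true
  · have hval : (pvNulP u f 0 kw).getD t none = none ∨
        pvTruthy ((pvNulP u f 0 kw).getD t none) = false := by
      rw [pvNulP_getD]
      simp only [Nat.zero_add]
      by_cases hcond : t < u.length ∧ t < kw.length ∧ f (u.getD t ' ') = true ∧
          pvTruthy (kw.getD t none) = true
      · left; rw [if_pos hcond]
      · right
        rw [if_neg hcond]
        cases htr : pvTruthy (kw.getD t none)
        · rfl
        · exfalso
          apply hcond
          have : c = u.getD t ' ' := by simpa using hcc
          exact ⟨ht, by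
            by_contra hk
            rw [List.getD, List.getElem?_eq_none (by omega : kw.length ≤ t)] at htr
            simp [pvTruthy] at htr, by rw [← this]; exact hc, htr⟩
    rcases hval with h | h
    · rw [h]; simp [pvTruthy]
    · rw [h]; simp
  · simp only [Bool.not_eq_true] at hcc
    rw [hcc]
    simp

theorem pvPickF_nulP_not_mem (u : List Char) (kw : List (Option String)) (c : Char)
    (f : Char → Bool) (hc : f c = false) :
    pvPickF c 0 (pvNulP u f 0 kw) u = pvPickF c 0 kw u := by
  apply pvPickF_congr
  intro t _ hcc
  simp only [Nat.zero_add]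
  rw [pvNulP_getD]
  simp only [Nat.zero_add]
  rw [if_neg (by
    rintro ⟨-, -, h3, -⟩
    have : c = u.getD t ' ' := by simpa using hcc
    rw [← this, hc] at h3
    exact absurd h3 (by simp))]

-- setting slot acc.length of acc ++ x :: l
theorem pvSet_append (acc : List (Option String)) (x y : Option String)
    (l : List (Option String)) :
    (acc ++ x :: l).set acc.length y = acc ++ y :: l := by
  induction acc with
  | nil => rfl
  | cons a acc ih => simp [List.set, ih]

-- A's mutation loops compute pvSpecBuild
theorem pvOuter_eq (u : List Char) (kw : List (Option String)) :
    ∀ (qs : List Char) (acc : List (Option String)) (seen : PySem.Set Char),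
      acc.length + qs.length ≤ kw.length →
      (pvOuterA u acc.length qs
          (acc ++ List.replicate (kw.length - acc.length) none,
           pvNulP u (fun d => PySem.Set.contains seen d) 0 kw)).1
        = pvSpecBuild u kw seen acc qs ++
            List.replicate (kw.length - (acc.length + qs.length)) none := by
  intro qs
  induction qs with
  | nil =>
      intro acc seen _
      simp [pvOuterA, pvSpecBuild]
  | cons c qs ih =>
      intro acc seen hlen
      simp only [List.length_cons] at hlen
      have hi : acc.length < kw.length := by omega
      obtain ⟨k, hk⟩ : ∃ k, kw.length - acc.length = k + 1 :=
        ⟨kw.length - acc.length - 1, by omega⟩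
      have hk' : kw.length - (acc.length + 1) = k := by omega
      have hrep : List.replicate (kw.length - acc.length) (none : Option String)
          = none :: List.replicate k none := by
        rw [hk, List.replicate_succ]
      have harith : kw.length - (acc.length + (qs.length + 1))
          = kw.length - (acc.length + 1 + qs.length) := by omega
      simp only [pvOuterA, pvSpecBuild, List.length_cons, harith]
      rw [hrep, pvInnerA_eq]
      by_cases hmem : PySem.Set.contains seen c = true
      · have hcm : c ∈ seen := (PySem.Set.contains_iff seen c).mp hmem
        rw [pvPickF_nulP_mem u kw c _ hmem]
        rw [pvNulF_nulP]
        rw [pvNulP_congr u _ (fun d => PySem.Set.contains seen d) (fun d => by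
          apply Bool.eq_iff_iff.mpr
          simp only [Bool.or_eq_true, PySem.Set.contains_iff, beq_iff_eq]
          constructor
          · rintro (h | h)
            · exact h
            · exact h ▸ hcm
          · exact Or.inl)]
        rw [if_pos hmem]
        have hst : acc ++ none :: List.replicate k none
            = (acc ++ [(none : Option String)]) ++
                List.replicate (kw.length - (acc.length + 1)) none := by
          rw [hk']
          simp
        rw [hst]
        have hlen1 : (acc ++ [(none : Option String)]).length = acc.length + 1 := by simp
        have hrec := ih (acc ++ [none]) seen
          (by simp only [List.length_append, List.length_cons, List.length_nil]; omega)
        rw [hlen1] at hrec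
        rw [hrec]
      · simp only [Bool.not_eq_true] at hmem
        rw [pvPickF_nulP_not_mem u kw c _ hmem]
        rw [pvNulF_nulP]
        rw [pvNulP_congr u _ (fun d => PySem.Set.contains (PySem.Set.add seen c) d)
          (fun d => (pvContains_add seen c d).symm)]
        rw [if_neg (by rw [hmem]; simp)]
        have hpickset :
            (match pvPickF c 0 kw u with
              | some s => (acc ++ none :: List.replicate k none).set acc.length (some s)
              | none => acc ++ none :: List.replicate k none)
            = (acc ++ [pvPickF c 0 kw u]) ++
                List.replicate (kw.length - (acc.length + 1)) none := by
          rw [hk']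
          cases hp : pvPickF c 0 kw u with
          | some s =>
              show (acc ++ none :: List.replicate k none).set acc.length (some s)
                = (acc ++ [some s]) ++ List.replicate k none
              rw [pvSet_append]
              simp
          | none =>
              show acc ++ none :: List.replicate k none
                = (acc ++ [(none : Option String)]) ++ List.replicate k none
              simp
        rw [hpickset]
        have hlen1 : (acc ++ [pvPickF c 0 kw u]).length = acc.length + 1 := by simp
        have hrec := ih (acc ++ [pvPickF c 0 kw u]) (PySem.Set.add seen c)
          (by simp only [List.length_append, List.length_cons, List.length_nil]; omega)
        rw [hlen1] at hrec
        rw [hrec]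

theorem pvBody_eq (u q : List Char) (kw : List (Option String))
    (hlen : q.length ≤ kw.length) :
    (pvOuterA u 0 q (List.replicate kw.length none, kw)).1
      = pvSpecBuild u kw PySem.Set.empty [] q ++
          List.replicate (kw.length - q.length) none := by
  have h0 : pvNulP u (fun d => PySem.Set.contains PySem.Set.empty d) 0 kw = kw := by
    rw [pvNulP_congr u (fun d => PySem.Set.contains PySem.Set.empty d) (fun _ => false)
      (fun d => rfl) kw 0]
    exact pvNulP_false u kw 0
  have := pvOuter_eq u kw q [] PySem.Set.empty (by simpa using hlen)
  simp only [List.length_nil, Nat.zero_add, List.nil_append, Nat.sub_zero] at this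
  rw [h0] at this
  exact this

-- Counter(a) == Counter(b) iff a is a permutation of b
theorem pvCounterEq_iff (a b : List Char) :
    pvCounterEq (PySem.Dict.counter a) (PySem.Dict.counter b) = true ↔ a.Perm b := by
  unfold pvCounterEq
  rw [Bool.and_eq_true, PySem.Set.equal_iff, List.all_eq_true]
  constructor
  · rintro ⟨hkeys, hall⟩
    rw [List.perm_iff_count]
    intro x
    by_cases hx : x ∈ a
    · have hxk : x ∈ (PySem.Dict.counter a).keys := by
        rw [PySem.Dict.keys_counter, PySem.Set.mem_ofList]; exact hx
      have := hall x hxk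
      rw [beq_iff_eq, PySem.Dict.getD_counter, PySem.Dict.getD_counter] at this
      exact_mod_cast this
    · have hxb : x ∉ b := by
        intro hxb
        apply hx
        have : x ∈ (PySem.Dict.counter b).keys := by
          rw [PySem.Dict.keys_counter, PySem.Set.mem_ofList]; exact hxb
        rw [PySem.Dict.keys_counter, PySem.Dict.keys_counter] at hkeys
        have := (hkeys x).mpr (by rwa [PySem.Dict.keys_counter] at this)
        rwa [PySem.Set.mem_ofList] at this
      rw [List.count_eq_zero_of_not_mem hx, List.count_eq_zero_of_not_mem hxb]
  · intro hperm
    constructor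
    · intro x
      rw [PySem.Dict.keys_counter, PySem.Dict.keys_counter,
        PySem.Set.mem_ofList, PySem.Set.mem_ofList]
      exact ⟨fun h => hperm.mem_iff.mp h, fun h => hperm.mem_iff.mpr h⟩
    · intro x _
      rw [beq_iff_eq, PySem.Dict.getD_counter, PySem.Dict.getD_counter]
      exact_mod_cast (List.perm_iff_count.mp hperm x)

-- B-side characterisation ------------------------------------------------------

-- the ordered truthy positions of character c in user_query
def pvTIdx (u : List Char) (kw : List (Option String)) (c : Char) : List Nat :=
  (u.zipIdx.filter (fun p => p.1 == c && pvTruthy (kw.getD p.2 none))).map (·.2)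

theorem pvSlotsB_getD (u : List Char) (kw : List (Option String)) (c : Char) :
    (pvSlotsB u kw).getD c [] = pvTIdx u kw c := by
  unfold pvSlotsB pvTIdx
  rw [← List.foldl_filter, PySem.Dict.getD_foldl_modify_append,
    PySem.Dict.getD_empty, List.nil_append, List.filter_filter]

def pvLastVal (kw : List (Option String)) (l : List Nat) : Option String :=
  match l.getLast? with
  | some j => kw.getD j none
  | none => none

theorem pvLastVal_concat (kw : List (Option String)) (l : List Nat) (j : Nat) :
    pvLastVal kw (l ++ [j]) = kw.getD j none := by
  simp [pvLastVal, List.getLast?_concat]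

theorem pvTIdx_snoc (u : List Char) (kw : List (Option String)) (c d : Char) :
    pvTIdx (u ++ [d]) kw c =
      pvTIdx u kw c ++
        (if (d == c) && pvTruthy (kw.getD u.length none) then [u.length] else []) := by
  unfold pvTIdx
  rw [List.zipIdx_append, List.filter_append, List.map_append]
  congr 1
  simp only [List.zipIdx, Nat.zero_add]
  split <;> simp_all

theorem pvPickF_eq_last (c : Char) (kw : List (Option String)) :
    ∀ u : List Char, pvPickF c 0 kw u = pvLastVal kw (pvTIdx u kw c) := by
  intro u
  induction u using List.reverseRecOn with
  | nil => simp [pvPickF, pvTIdx, pvLastVal]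
  | append_singleton u d ih =>
      rw [pvPickF_snoc, pvTIdx_snoc]
      simp only [Nat.zero_add]
      by_cases hc : c = d
      · subst hc
        by_cases ht : pvTruthy (kw.getD u.length none) = true
        · simp only [List.getD] at ht
          rw [if_pos (by simp [List.getD, ht]), if_pos (by simp [List.getD, ht]),
            pvLastVal_concat]
        · simp only [Bool.not_eq_true, List.getD] at ht
          rw [if_neg (by simp [List.getD, ht]), if_neg (by simp [List.getD, ht]),
            List.append_nil, ih]
      · have h1 : (c == d) = false := by simp [hc]
        have h2 : (d == c) = false := by simp [Ne.symm hc]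
        rw [if_neg (by simp [h1]), if_neg (by simp [h2]), List.append_nil, ih]

theorem pvMem_tIdx_truthy (u : List Char) (kw : List (Option String)) (c : Char)
    (j : Nat) (hj : j ∈ pvTIdx u kw c) : pvTruthy (kw.getD j none) = true := by
  unfold pvTIdx at hj
  obtain ⟨p, hp, hpj⟩ := List.mem_map.mp hj
  have := List.of_mem_filter hp
  rw [Bool.and_eq_true] at this
  rw [← hpj]
  exact this.2

def pvOK (u : List Char) (kw : List (Option String)) : Prop :=
  ∀ c, (pvTIdx u kw c).length ≤ 1

-- B's build equals pvSpecBuild when every character has at most one truthy position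
theorem pvBuildAlt_eq_spec (u : List Char) (kw : List (Option String))
    (hOK : pvOK u kw) :
    ∀ (qs : List Char) (d : PySem.Dict Char (List Nat)) (seen : PySem.Set Char)
      (acc : List (Option String)),
      (∀ c, d.getD c [] =
        if PySem.Set.contains seen c = true then [] else pvTIdx u kw c) →
      pvBuildAlt kw d acc qs = pvSpecBuild u kw seen acc qs := by
  intro qs
  induction qs with
  | nil => intro d seen acc _; rfl
  | cons c qs ih =>
      intro d seen acc hinv
      simp only [pvBuildAlt, pvSpecBuild]
      by_cases hm : PySem.Set.contains seen c = true
      · rw [if_pos hm]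
        have hd : d.getD c [] = [] := by rw [hinv c, if_pos hm]
        rw [hd]
        exact ih d seen (acc ++ [none]) hinv
      · rw [if_neg hm]
        have hd : d.getD c [] = pvTIdx u kw c := by
          rw [hinv c, if_neg hm]
        cases hT : pvTIdx u kw c with
        | nil =>
            rw [hd, hT]
            rw [pvPickF_eq_last, hT]
            show pvBuildAlt kw d (acc ++ [none]) qs = pvSpecBuild u kw (PySem.Set.add seen c) (acc ++ [pvLastVal kw []]) qs
            apply ih d (PySem.Set.add seen c) (acc ++ [pvLastVal kw []])
            intro c'
            rw [hinv c', pvContains_add]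
            by_cases hcc : c' = c
            · subst hcc
              simp only [Bool.not_eq_true] at hm
              simp [hm, hT]
            · have : (c' == c) = false := by simp [hcc]
              simp [this]
        | cons j js =>
            have hjs : js = [] := by
              have := hOK c
              rw [hT] at this
              simp at this
              exact this
            subst hjs
            rw [hd, hT]
            rw [pvPickF_eq_last, hT]
            have hLV : pvLastVal kw [j] = kw.getD j none := by
              simpa using pvLastVal_concat kw [] j
            rw [hLV]
            apply ih (d.insert c []) (PySem.Set.add seen c) (acc ++ [kw.getD j none])
            intro c'
            rw [PySem.Dict.getD_insert, pvContains_add]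
            by_cases hcc : c' = c
            · subst hcc
              simp
            · have hbc : (c' == c) = false := by simp [hcc]
              rw [if_neg hcc, hinv c', hbc, Bool.or_false]

-- the two loops agree when every perm-matching template admits it
theorem pvLoop_eq (u : List Char) (kw : List (Option String)) :
    ∀ (qs : List String) (num : Int),
      (∀ q ∈ qs, u.Perm q.toList → q.toList.length ≤ kw.length ∧ pvOK u kw) →
      pvLoopA u kw num qs = pvLoopB u kw (PySem.List.sorted u (fun x => x)) num qs := by
  intro qs
  induction qs with
  | nil => intro num _; rfl
  | cons q rest ih =>
      intro num hpre
      simp only [pvLoopA, pvLoopB]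
      by_cases hp : u.Perm q.toList
      · rw [if_pos ((pvCounterEq_iff u q.toList).mpr hp)]
        rw [if_pos ((PySem.List.sorted_id_eq_sorted_id_iff_perm q.toList u).mpr hp.symm)]
        obtain ⟨hlen, hOK⟩ := hpre q (by simp) hp
        rw [pvBody_eq u q.toList kw hlen]
        rw [pvBuildAlt_eq_spec u kw hOK q.toList (pvSlotsB u kw) PySem.Set.empty []
          (fun c => by rw [pvSlotsB_getD]; rfl)]
      · rw [if_neg (fun h => hp ((pvCounterEq_iff u q.toList).mp h))]
        rw [if_neg (fun h => hp
          (((PySem.List.sorted_id_eq_sorted_id_iff_perm q.toList u).mp h).symm))]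
        exact ih (num+1) (fun q' hq' => hpre q' (by simp [hq']))

-- inside D_: the two builds differ at the repeated character ------------------

def pvValOf (kw : List (Option String)) (d : PySem.Dict Char (List Nat)) (c : Char) :
    Option String :=
  match d.getD c [] with
  | [] => none
  | j :: _ => kw.getD j none

def pvStepD (d : PySem.Dict Char (List Nat)) (c : Char) : PySem.Dict Char (List Nat) :=
  match d.getD c [] with
  | [] => d
  | _ :: js => d.insert c js

def pvDAfter (d : PySem.Dict Char (List Nat)) (qs : List Char) :
    PySem.Dict Char (List Nat) :=
  qs.foldl pvStepD d

theorem pvBuildAlt_cons_nil (kw : List (Option String)) (d : PySem.Dict Char (List Nat))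
    (acc : List (Option String)) (c : Char) (qs : List Char) (h : d.getD c [] = []) :
    pvBuildAlt kw d acc (c :: qs) = pvBuildAlt kw d (acc ++ [none]) qs := by
  simp [pvBuildAlt, h]

theorem pvBuildAlt_cons_cons (kw : List (Option String)) (d : PySem.Dict Char (List Nat))
    (acc : List (Option String)) (c : Char) (qs : List Char) (j : Nat) (js : List Nat)
    (h : d.getD c [] = j :: js) :
    pvBuildAlt kw d acc (c :: qs)
      = pvBuildAlt kw (d.insert c js) (acc ++ [kw.getD j none]) qs := by
  simp [pvBuildAlt, h]

theorem pvBuildAlt_acc (kw : List (Option String)) :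
    ∀ (qs : List Char) (d : PySem.Dict Char (List Nat)) (acc : List (Option String)),
      pvBuildAlt kw d acc qs = acc ++ pvBuildAlt kw d [] qs := by
  intro qs
  induction qs with
  | nil => intro d acc; simp [pvBuildAlt]
  | cons c qs ih =>
      intro d acc
      cases h : d.getD c [] with
      | nil =>
          rw [pvBuildAlt_cons_nil kw d acc c qs h, pvBuildAlt_cons_nil kw d [] c qs h,
            ih d (acc ++ [none]), ih d ([] ++ [none]), List.nil_append, List.append_assoc]
      | cons j js =>
          rw [pvBuildAlt_cons_cons kw d acc c qs j js h,
            pvBuildAlt_cons_cons kw d [] c qs j js h,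
            ih _ (acc ++ [kw.getD j none]), ih _ ([] ++ [kw.getD j none]),
            List.nil_append, List.append_assoc]

theorem pvBuildAlt_length (kw : List (Option String)) :
    ∀ (qs : List Char) (d : PySem.Dict Char (List Nat)) (acc : List (Option String)),
      (pvBuildAlt kw d acc qs).length = acc.length + qs.length := by
  intro qs
  induction qs with
  | nil => intro d acc; simp [pvBuildAlt]
  | cons c qs ih =>
      intro d acc
      cases h : d.getD c [] with
      | nil => rw [pvBuildAlt_cons_nil kw d acc c qs h, ih]; simp; omega
      | cons j js => rw [pvBuildAlt_cons_cons kw d acc c qs j js h, ih]; simp; omega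

theorem pvBuildAlt_split (kw : List (Option String)) :
    ∀ (qs qs' : List Char) (d : PySem.Dict Char (List Nat)) (acc : List (Option String)),
      pvBuildAlt kw d acc (qs ++ qs') =
        pvBuildAlt kw (pvDAfter d qs) (pvBuildAlt kw d acc qs) qs' := by
  intro qs
  induction qs with
  | nil => intro qs' d acc; rfl
  | cons c qs ih =>
      intro qs' d acc
      have hD : pvDAfter d (c :: qs) = pvDAfter (pvStepD d c) qs := rfl
      rw [List.cons_append]
      cases h : d.getD c [] with
      | nil =>
          have hs : pvStepD d c = d := by simp [pvStepD, h]
          rw [pvBuildAlt_cons_nil kw d acc c (qs ++ qs') h,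
            pvBuildAlt_cons_nil kw d acc c qs h, hD, hs]
          exact ih qs' d (acc ++ [none])
      | cons j js =>
          have hs : pvStepD d c = d.insert c js := by simp [pvStepD, h]
          rw [pvBuildAlt_cons_cons kw d acc c (qs ++ qs') j js h,
            pvBuildAlt_cons_cons kw d acc c qs j js h, hD, hs]
          exact ih qs' (d.insert c js) (acc ++ [kw.getD j none])

theorem pvBuildAlt_singleton (kw : List (Option String))
    (d : PySem.Dict Char (List Nat)) (acc : List (Option String)) (c : Char) :
    pvBuildAlt kw d acc [c] = acc ++ [pvValOf kw d c] := by
  simp only [pvBuildAlt, pvValOf]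
  cases h : d.getD c [] <;> rfl

theorem pvDAfter_getD :
    ∀ (qs : List Char) (d : PySem.Dict Char (List Nat)) (c : Char),
      (pvDAfter d qs).getD c [] = (d.getD c []).drop (qs.count c) := by
  intro qs
  induction qs with
  | nil => intro d c; rfl
  | cons e qs ih =>
      intro d c
      have hD : pvDAfter d (e :: qs) = pvDAfter (pvStepD d e) qs := rfl
      rw [hD, ih, List.count_cons]
      by_cases hec : e = c
      · subst hec
        simp only [beq_self_eq_true, if_true]
        cases h : d.getD e [] with
        | nil =>
            have hs : pvStepD d e = d := by simp [pvStepD, h]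
            rw [hs, h]
            simp [List.drop_nil]
        | cons j js =>
            have hs : pvStepD d e = d.insert e js := by simp [pvStepD, h]
            rw [hs, PySem.Dict.getD_insert, if_pos rfl, List.drop_succ_cons]
      · have hbc : (e == c) = false := by simp [hec]
        rw [hbc]
        simp only [Bool.false_eq_true, if_false, Nat.add_zero]
        cases h : d.getD e [] with
        | nil =>
            have hs : pvStepD d e = d := by simp [pvStepD, h]
            rw [hs]
        | cons j js =>
            have hs : pvStepD d e = d.insert e js := by simp [pvStepD, h]
            rw [hs, PySem.Dict.getD_insert, if_neg (Ne.symm hec)]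

def pvSeenAfter (seen : PySem.Set Char) (qs : List Char) : PySem.Set Char :=
  qs.foldl (fun s c => if PySem.Set.contains s c then s else PySem.Set.add s c) seen

theorem pvSpecBuild_acc (u : List Char) (kw : List (Option String)) :
    ∀ (qs : List Char) (seen : PySem.Set Char) (acc : List (Option String)),
      pvSpecBuild u kw seen acc qs = acc ++ pvSpecBuild u kw seen [] qs := by
  intro qs
  induction qs with
  | nil => intro seen acc; simp [pvSpecBuild]
  | cons c qs ih =>
      intro seen acc
      simp only [pvSpecBuild]
      by_cases hm : PySem.Set.contains seen c = true
      · rw [if_pos hm, if_pos hm, ih seen (acc ++ [none]), ih seen ([] ++ [none]),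
          List.nil_append, List.append_assoc]
      · rw [if_neg hm, if_neg hm, ih _ (acc ++ [pvPickF c 0 kw u]),
          ih _ ([] ++ [pvPickF c 0 kw u]), List.nil_append, List.append_assoc]

theorem pvSpecBuild_split (u : List Char) (kw : List (Option String)) :
    ∀ (qs qs' : List Char) (seen : PySem.Set Char) (acc : List (Option String)),
      pvSpecBuild u kw seen acc (qs ++ qs') =
        pvSpecBuild u kw (pvSeenAfter seen qs) (pvSpecBuild u kw seen acc qs) qs' := by
  intro qs
  induction qs with
  | nil => intro qs' seen acc; rfl
  | cons c qs ih =>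
      intro qs' seen acc
      simp only [List.cons_append, pvSpecBuild]
      have hS : pvSeenAfter seen (c :: qs)
          = pvSeenAfter (if PySem.Set.contains seen c then seen else PySem.Set.add seen c) qs := rfl
      by_cases hm : PySem.Set.contains seen c = true
      · rw [if_pos hm, if_pos hm, hS, if_pos hm]
        exact ih qs' seen (acc ++ [none])
      · rw [if_neg hm, if_neg hm, hS, if_neg hm]
        exact ih qs' (PySem.Set.add seen c) (acc ++ [pvPickF c 0 kw u])

theorem pvSpecBuild_singleton (u : List Char) (kw : List (Option String))
    (seen : PySem.Set Char) (acc : List (Option String)) (c : Char) :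
    pvSpecBuild u kw seen acc [c] =
      acc ++ [if PySem.Set.contains seen c = true then none else pvPickF c 0 kw u] := by
  simp only [pvSpecBuild]
  by_cases hm : PySem.Set.contains seen c = true
  · rw [if_pos hm, if_pos hm]
  · rw [if_neg hm, if_neg hm]

theorem pvSpecBuild_length (u : List Char) (kw : List (Option String)) :
    ∀ (qs : List Char) (seen : PySem.Set Char) (acc : List (Option String)),
      (pvSpecBuild u kw seen acc qs).length = acc.length + qs.length := by
  intro qs
  induction qs with
  | nil => intro seen acc; simp [pvSpecBuild]
  | cons c qs ih =>
      intro seen acc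
      simp only [pvSpecBuild]
      by_cases hm : PySem.Set.contains seen c = true
      · rw [if_pos hm, ih]; simp; omega
      · rw [if_neg hm, ih]; simp; omega

theorem pvSeenAfter_contains :
    ∀ (qs : List Char) (seen : PySem.Set Char) (c : Char),
      PySem.Set.contains (pvSeenAfter seen qs) c = true ↔
        PySem.Set.contains seen c = true ∨ c ∈ qs := by
  intro qs
  induction qs with
  | nil => intro seen c; simp [pvSeenAfter]
  | cons e qs ih =>
      intro seen c
      have hS : pvSeenAfter seen (e :: qs)
          = pvSeenAfter (if PySem.Set.contains seen e then seen else PySem.Set.add seen e) qs := rfl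
      rw [hS]
      by_cases hm : PySem.Set.contains seen e = true
      · rw [if_pos hm, ih]
        constructor
        · rintro (h | h)
          · exact Or.inl h
          · exact Or.inr (List.mem_cons_of_mem _ h)
        · rintro (h | h)
          · exact Or.inl h
          · rcases List.mem_cons.mp h with rfl | h
            · exact Or.inl hm
            · exact Or.inr h
      · rw [if_neg hm, ih, pvContains_add]
        simp only [Bool.or_eq_true, beq_iff_eq, List.mem_cons]
        tauto

theorem pvGetD_mid (l1 : List (Option String)) (x : Option String)
    (l2 : List (Option String)) :
    (l1 ++ x :: l2).getD l1.length none = x := by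
  induction l1 with
  | nil => rfl
  | cons a l1 ih => simpa using ih

-- the two bodies differ at the second occurrence of the repeated character
theorem pvBodies_ne (u : List Char) (kw : List (Option String)) (dup : Char)
    (qs1 tail : List Char) (hmem : dup ∈ qs1) (hcnt : qs1.count dup = 1)
    (h2 : 2 ≤ (pvTIdx u kw dup).length)
    (hlen : (qs1 ++ dup :: tail).length ≤ kw.length) :
    (pvOuterA u 0 (qs1 ++ dup :: tail) (List.replicate kw.length none, kw)).1
      ≠ pvBuildAlt kw (pvSlotsB u kw) [] (qs1 ++ dup :: tail) ++
          List.replicate (kw.length - (qs1 ++ dup :: tail).length) none := by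
  intro heq
  rw [pvBody_eq u _ kw hlen] at heq
  have hassoc : ∀ l : List Char, qs1 ++ dup :: l = (qs1 ++ [dup]) ++ l := by
    intro l; simp
  -- A's value at position qs1.length is none
  have hA : (pvSpecBuild u kw PySem.Set.empty [] (qs1 ++ dup :: tail) ++
      List.replicate (kw.length - (qs1 ++ dup :: tail).length) none).getD qs1.length none
        = none := by
    rw [hassoc, pvSpecBuild_split, pvSpecBuild_acc, pvSpecBuild_split,
      pvSpecBuild_singleton]
    rw [if_pos ((pvSeenAfter_contains qs1 PySem.Set.empty dup).mpr (Or.inr hmem))]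
    have hpl : (pvSpecBuild u kw PySem.Set.empty [] qs1).length = qs1.length := by
      rw [pvSpecBuild_length]; simp
    rw [List.append_assoc, List.append_assoc, ← hpl]
    exact pvGetD_mid _ _ _
  -- B's value there is a truthy keyword
  obtain ⟨j1, j2, rest, hT⟩ : ∃ j1 j2 rest, pvTIdx u kw dup = j1 :: j2 :: rest := by
    cases hT : pvTIdx u kw dup with
    | nil => rw [hT] at h2; simp at h2
    | cons j1 l =>
        cases l with
        | nil => rw [hT] at h2; simp at h2
        | cons j2 rest => exact ⟨j1, j2, rest, rfl⟩
  have hval : pvValOf kw (pvDAfter (pvSlotsB u kw) qs1) dup = kw.getD j2 none := by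
    unfold pvValOf
    rw [pvDAfter_getD, pvSlotsB_getD, hT, hcnt, List.drop_succ_cons, List.drop_zero]
  have hj2 : j2 ∈ pvTIdx u kw dup := by rw [hT]; simp
  obtain ⟨s, hs⟩ := pvTruthy_some _ (pvMem_tIdx_truthy u kw dup j2 hj2)
  have hB : (pvBuildAlt kw (pvSlotsB u kw) [] (qs1 ++ dup :: tail) ++
      List.replicate (kw.length - (qs1 ++ dup :: tail).length) none).getD qs1.length none
        = some s := by
    rw [hassoc, pvBuildAlt_split, pvBuildAlt_acc, pvBuildAlt_split,
      pvBuildAlt_singleton, hval, hs]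
    have hpl : (pvBuildAlt kw (pvSlotsB u kw) [] qs1).length = qs1.length := by
      rw [pvBuildAlt_length]; simp
    rw [List.append_assoc, List.append_assoc, ← hpl]
    exact pvGetD_mid _ _ _
  rw [heq, hB] at hA
  simp at hA

-- the loops land on the same template; differing bodies give differing results
theorem pvLoop_ne (u : List Char) (kw : List (Option String)) :
    ∀ (qs : List String) (num : Int),
      (∀ q ∈ qs, u.Perm q.toList →
        (pvOuterA u 0 q.toList (List.replicate kw.length none, kw)).1
          ≠ pvBuildAlt kw (pvSlotsB u kw) [] q.toList ++
              List.replicate (kw.length - q.toList.length) none) →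
      (∃ q ∈ qs, u.Perm q.toList) →
      pvLoopA u kw num qs ≠ pvLoopB u kw (PySem.List.sorted u (fun x => x)) num qs := by
  intro qs
  induction qs with
  | nil => intro num _ hex; simp at hex
  | cons q rest ih =>
      intro num hbody hex
      simp only [pvLoopA, pvLoopB]
      by_cases hp : u.Perm q.toList
      · rw [if_pos ((pvCounterEq_iff u q.toList).mpr hp)]
        rw [if_pos ((PySem.List.sorted_id_eq_sorted_id_iff_perm q.toList u).mpr hp.symm)]
        intro h
        exact hbody q (by simp) hp (congrArg Prod.snd h)
      · rw [if_neg (fun h => hp ((pvCounterEq_iff u q.toList).mp h))]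
        rw [if_neg (fun h => hp
          (((PySem.List.sorted_id_eq_sorted_id_iff_perm q.toList u).mp h).symm))]
        refine ih (num+1) (fun q' hq' => hbody q' (by simp [hq'])) ?_
        obtain ⟨q', hq', hp'⟩ := hex
        rcases List.mem_cons.mp hq' with rfl | hq'
        · exact absurd hp' hp
        · exact ⟨q', hq', hp'⟩

-- deriving pvOK outside D_ ----------------------------------------------------

theorem pvTruthy_eq_getD (v : Option String) :
    pvTruthy v = (v.getD "" != "") := by
  cases v with
  | none => rfl
  | some s => exact Bool.le_antisymm (fun a => a) (fun a => a)

theorem pvTIdx_length_eq (u : List Char) (kw : List (Option String)) (c : Char) :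
    (pvTIdx u kw c).length =
      (u.zipIdx.filter (fun p => p.1 == c && ((kw.getD p.2 none).getD "" != ""))).length := by
  unfold pvTIdx
  rw [List.length_map]
  congr 1
  apply List.filter_congr
  intro p _
  rw [pvTruthy_eq_getD]

theorem pvTIdx_le_count (u : List Char) (kw : List (Option String)) (c : Char) :
    (pvTIdx u kw c).length ≤ u.count c := by
  unfold pvTIdx
  rw [List.length_map, ← List.countP_eq_length_filter]
  have h1 : List.countP (fun p => p.1 == c && pvTruthy (kw.getD p.2 none)) u.zipIdx
      ≤ List.countP (fun p => p.1 == c) u.zipIdx := by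
    apply List.countP_mono_left
    intro p _ hp
    exact (Bool.and_eq_true _ _ ▸ hp).1
  refine le_trans h1 (le_of_eq ?_)
  have h2 : u = u.zipIdx.map Prod.fst := (List.zipIdx_map_fst 0 u).symm
  conv_rhs => rw [h2]
  rw [List.count_eq_countP, List.countP_map]
  rfl

theorem pvOK_of_notD (user_query : String) (kw : List (Option String))
    (q : String) (hq : q ∈ pvQueries) (hperm : user_query.toList.Perm q.toList)
    (hnD : ¬ D_query_matching user_query kw) :
    pvOK user_query.toList kw := by
  intro c
  have hbase : ∀ L : List Char, user_query.toList.Perm L → L.count c ≤ 1 →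
      (pvTIdx user_query.toList kw c).length ≤ 1 := by
    intro L hp hc
    refine le_trans (pvTIdx_le_count _ kw c) ?_
    rw [hp.count_eq]
    exact hc
  have hdupC : (user_query.toList.Perm ['C','C'] ∨ user_query.toList.Perm ['C','R','C'] ∨
      user_query.toList.Perm ['C','P','V','R','C']) → c = 'C' →
      (pvTIdx user_query.toList kw c).length ≤ 1 := by
    intro hp hc
    subst hc
    by_contra hgt
    exact hnD (Or.inl ⟨hp, by
      rw [← pvTIdx_length_eq]
      omega⟩)
  have hdupI : user_query.toList.Perm ['I','I'] → c = 'I' →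
      (pvTIdx user_query.toList kw c).length ≤ 1 := by
    intro hp hc
    subst hc
    by_contra hgt
    exact hnD (Or.inr ⟨hp, by
      rw [← pvTIdx_length_eq]
      omega⟩)
  simp only [pvQueries, List.mem_cons, List.not_mem_nil, or_false] at hq
  rcases hq with rfl | rfl | rfl | rfl | rfl | rfl | rfl | rfl | rfl | rfl | rfl | rfl | rfl
  · exact hbase _ hperm (by by_cases hc : c = 'C' <;> simp [List.count_cons, hc, eq_comm])
  · exact hbase _ hperm (by by_cases hc : c = 'I' <;> simp [List.count_cons, hc, eq_comm])
  · exact hbase _ hperm (by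
      by_cases h1 : c = 'C' <;> by_cases h2 : c = 'R' <;>
        simp_all [List.count_cons, eq_comm])
  · by_cases hc : c = 'C'
    · exact hdupC (Or.inl hperm) hc
    · exact hbase _ hperm (by simp [List.count_cons, Ne.symm hc, eq_comm])
  · exact hbase _ hperm (by
      by_cases h1 : c = 'I' <;> by_cases h2 : c = 'R' <;>
        simp_all [List.count_cons, eq_comm])
  · by_cases hc : c = 'I'
    · exact hdupI hperm hc
    · exact hbase _ hperm (by simp [List.count_cons, Ne.symm hc, eq_comm])
  · exact hbase _ hperm (by
      by_cases h1 : c = 'I' <;> by_cases h2 : c = 'P' <;>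
        simp_all [List.count_cons, eq_comm])
  · by_cases hc : c = 'C'
    · exact hdupC (Or.inr (Or.inl hperm)) hc
    · exact hbase _ hperm (by
        by_cases h2 : c = 'R' <;> simp_all [List.count_cons, Ne.symm hc, eq_comm])
  · exact hbase _ hperm (by
      by_cases h1 : c = 'C' <;> by_cases h2 : c = 'P' <;> by_cases h3 : c = 'V' <;>
        simp_all [List.count_cons, eq_comm])
  · exact hbase _ hperm (by
      by_cases h1 : c = 'C' <;> by_cases h2 : c = 'R' <;> by_cases h3 : c = 'I' <;>
        simp_all [List.count_cons, eq_comm])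
  · exact hbase _ hperm (by
      by_cases h1 : c = 'I' <;> by_cases h2 : c = 'R' <;> by_cases h3 : c = 'P' <;>
        by_cases h4 : c = 'V' <;> simp_all [List.count_cons, eq_comm])
  · by_cases hc : c = 'C'
    · exact hdupC (Or.inr (Or.inr hperm)) hc
    · exact hbase _ hperm (by
        by_cases h2 : c = 'P' <;> by_cases h3 : c = 'V' <;> by_cases h4 : c = 'R' <;>
          simp_all [List.count_cons, Ne.symm hc, eq_comm])
  · by_cases hc : c = 'C'
    · exact hdupC (Or.inr (Or.inr
        (hperm.trans (by decide : (['C','R','C','P','V'] : List Char).Perm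
          ['C','P','V','R','C'])))) hc
    · exact hbase _ hperm (by
        by_cases h2 : c = 'R' <;> by_cases h3 : c = 'P' <;> by_cases h4 : c = 'V' <;>
          simp_all [List.count_cons, Ne.symm hc, eq_comm])

-- ===== VERDICT helper: main equivalence =====
theorem query_matching_spec : Claim_unchanged_query_matching := by
  intro user_query keywords _ hpre
  intro hnD
  unfold query_matching query_matching_alt
  apply pvLoop_eq
  intro q hq hperm
  refine ⟨?_, pvOK_of_notD user_query keywords q hq hperm hnD⟩
  rw [← hperm.length_eq]
  exact hpre ⟨q, hq, hperm⟩

theorem query_matching_changed : Claim_changed_query_matching := by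
  unfold Claim_changed_query_matching; decide

theorem query_matching_tight : Claim_exact_query_matching := by
  intro user_query keywords _ hpre hD
  unfold query_matching query_matching_alt
  rcases hD with ⟨hcls3, hcnt⟩ | ⟨hcls, hcnt⟩
  · have h2 : 2 ≤ (pvTIdx user_query.toList keywords 'C').length := by
      rw [pvTIdx_length_eq]; exact hcnt
    rcases hcls3 with hcls | hcls | hcls
    · have hq : user_query.toList.Perm "CC".toList := by
        rw [(by decide : ("CC" : String).toList = ['C','C'])]; exact hcls
      have hlen : user_query.toList.length ≤ keywords.length :=
        hpre ⟨"CC", by simp [pvQueries], hq⟩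
      apply pvLoop_ne _ _ _ _ _ ⟨"CC", by simp [pvQueries], hq⟩
      intro q hqq hperm
      simp only [pvQueries, List.mem_cons, List.not_mem_nil, or_false] at hqq
      rcases hqq with rfl|rfl|rfl|rfl|rfl|rfl|rfl|rfl|rfl|rfl|rfl|rfl|rfl <;>
      first
        | exact absurd (hcls.symm.trans hperm) (by decide)
        | (rw [(by decide : ("CC" : String).toList = ['C'] ++ 'C' :: [])]
           refine pvBodies_ne user_query.toList keywords 'C' ['C'] []
             (by decide) (by decide) h2 ?_
           have hl := hperm.length_eq
           rw [(by decide : ("CC" : String).toList = ['C'] ++ 'C' :: [])] at hl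
           omega)
    · have hq : user_query.toList.Perm "CRC".toList := by
        rw [(by decide : ("CRC" : String).toList = ['C','R','C'])]; exact hcls
      have hlen : user_query.toList.length ≤ keywords.length :=
        hpre ⟨"CRC", by simp [pvQueries], hq⟩
      apply pvLoop_ne _ _ _ _ _ ⟨"CRC", by simp [pvQueries], hq⟩
      intro q hqq hperm
      simp only [pvQueries, List.mem_cons, List.not_mem_nil, or_false] at hqq
      rcases hqq with rfl|rfl|rfl|rfl|rfl|rfl|rfl|rfl|rfl|rfl|rfl|rfl|rfl <;>
      first
        | exact absurd (hcls.symm.trans hperm) (by decide)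
        | (rw [(by decide : ("CRC" : String).toList = ['C','R'] ++ 'C' :: [])]
           refine pvBodies_ne user_query.toList keywords 'C' ['C','R'] []
             (by decide) (by decide) h2 ?_
           have hl := hperm.length_eq
           rw [(by decide : ("CRC" : String).toList = ['C','R'] ++ 'C' :: [])] at hl
           omega)
    · have hq : user_query.toList.Perm "CPVRC".toList := by
        rw [(by decide : ("CPVRC" : String).toList = ['C','P','V','R','C'])]; exact hcls
      have hlen : user_query.toList.length ≤ keywords.length :=
        hpre ⟨"CPVRC", by simp [pvQueries], hq⟩
      apply pvLoop_ne _ _ _ _ _ ⟨"CPVRC", by simp [pvQueries], hq⟩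
      intro q hqq hperm
      simp only [pvQueries, List.mem_cons, List.not_mem_nil, or_false] at hqq
      rcases hqq with rfl|rfl|rfl|rfl|rfl|rfl|rfl|rfl|rfl|rfl|rfl|rfl|rfl <;>
      first
        | exact absurd (hcls.symm.trans hperm) (by decide)
        | (rw [(by decide :
              ("CPVRC" : String).toList = ['C','P','V','R'] ++ 'C' :: [])]
           refine pvBodies_ne user_query.toList keywords 'C' ['C','P','V','R'] []
             (by decide) (by decide) h2 ?_
           have hl := hperm.length_eq
           rw [(by decide :
              ("CPVRC" : String).toList = ['C','P','V','R'] ++ 'C' :: [])] at hl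
           omega)
        | (rw [(by decide :
              ("CRCPV" : String).toList = ['C','R'] ++ 'C' :: ['P','V'])]
           refine pvBodies_ne user_query.toList keywords 'C' ['C','R'] ['P','V']
             (by decide) (by decide) h2 ?_
           have hl := hperm.length_eq
           rw [(by decide :
              ("CRCPV" : String).toList = ['C','R'] ++ 'C' :: ['P','V'])] at hl
           omega)
  · have h2 : 2 ≤ (pvTIdx user_query.toList keywords 'I').length := by
      rw [pvTIdx_length_eq]; exact hcnt
    have hq : user_query.toList.Perm "II".toList := by
      rw [(by decide : ("II" : String).toList = ['I','I'])]; exact hcls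
    have hlen : user_query.toList.length ≤ keywords.length :=
      hpre ⟨"II", by simp [pvQueries], hq⟩
    apply pvLoop_ne _ _ _ _ _ ⟨"II", by simp [pvQueries], hq⟩
    intro q hqq hperm
    simp only [pvQueries, List.mem_cons, List.not_mem_nil, or_false] at hqq
    rcases hqq with rfl|rfl|rfl|rfl|rfl|rfl|rfl|rfl|rfl|rfl|rfl|rfl|rfl <;>
    first
      | exact absurd (hcls.symm.trans hperm) (by decide)
      | (rw [(by decide : ("II" : String).toList = ['I'] ++ 'I' :: [])]
         refine pvBodies_ne user_query.toList keywords 'I' ['I'] []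
           (by decide) (by decide) h2 ?_
         have hl := hperm.length_eq
         rw [(by decide : ("II" : String).toList = ['I'] ++ 'I' :: [])] at hl
         omega)
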